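-- pv_equiv track=rewrite | github.com/Crane-YU/basketball_predict | read_data.py | cal_rank
-- ===== SOURCE A (Python) =====
-- def cal_rank(idx_list):
--     len_idx = len(idx_list)
--     new_list = []
--     idx = 0
--     for i in range(0, len_idx):
--         if i == len_idx - 1:
--             new_list.append(idx + 1)
--             break
--         if idx_list[i] == idx_list[i + 1]:
--             idx = idx + 1
--             new_list.append(idx)
--         else:
--             new_list.append(idx + 1)
--             idx = 0
--         i = i + 1
--     return new_list
-- ===== SOURCE B (Python) =====
-- def cal_rank(idx_list):
--     # Group the list into maximal runs of consecutive-equal elements and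
--     # emit 1..L for each run of length L.
--     out = []
--     n = len(idx_list)
--     i = 0
--     while i < n:
--         j = i + 1
--         while j < n and idx_list[j] == idx_list[i]:
--             j += 1
--         out.extend(range(1, j - i + 1))
--         i = j
--     return out
-- ===== Notes on version B (the rewrite author's own statement) =====
-- stated objective: idiomatic
-- what changed: B finds each maximal run of consecutive-equal elements with an inner scan and extends the output with range(1, L+1), replacing A's adjacent-pair comparison with a manual counter/reset and a special-cased last element.
import Mathlib
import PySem

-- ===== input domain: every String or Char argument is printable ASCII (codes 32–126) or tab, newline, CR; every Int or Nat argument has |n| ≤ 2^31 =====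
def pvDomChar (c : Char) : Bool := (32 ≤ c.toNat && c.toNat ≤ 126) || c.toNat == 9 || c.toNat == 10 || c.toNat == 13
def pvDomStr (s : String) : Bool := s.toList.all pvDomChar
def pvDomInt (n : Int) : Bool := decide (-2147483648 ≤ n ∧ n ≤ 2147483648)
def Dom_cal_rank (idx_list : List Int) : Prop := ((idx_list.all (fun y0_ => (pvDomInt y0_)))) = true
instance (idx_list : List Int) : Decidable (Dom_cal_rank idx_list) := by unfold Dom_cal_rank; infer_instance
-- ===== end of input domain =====

-- B replaces A's adjacent-pair comparison with counter/reset by a run-grouping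
-- scan emitting 1..L per maximal run (objective: more idiomatic, same O(n) cost).
-- Loops are ported as structural recursion on a fuel counter that only makes the
-- same computation total (fuel = list length always suffices).

-- ===== PORT A =====
-- literal port of A's indexed for-loop (counter idx, early break at the last element)
def cal_rank_loop (idx_list : List Int) (len_idx : Nat) : Nat → Nat → Int → List Int → List Int
  | 0, _, _, new_list => new_list
  | fuel + 1, i, idx, new_list =>
    if i < len_idx then
      if i = len_idx - 1 then
        new_list ++ [idx + 1]
      else if PySem.List.pyGet? idx_list ((i : Int)) = PySem.List.pyGet? idx_list (((i + 1 : Nat) : Int)) then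
        cal_rank_loop idx_list len_idx fuel (i + 1) (idx + 1) (new_list ++ [idx + 1])
      else
        cal_rank_loop idx_list len_idx fuel (i + 1) 0 (new_list ++ [idx + 1])
    else new_list

def cal_rank (idx_list : List Int) : List Int :=
  cal_rank_loop idx_list idx_list.length idx_list.length 0 0 []

-- ===== PORT B =====
-- inner while loop: advance j while j < n and idx_list[j] == idx_list[i]
def cal_rank_scan (xs : List Int) (n : Nat) (v : Option Int) : Nat → Nat → Nat
  | 0, j => j
  | fuel + 1, j =>
    if j < n ∧ PySem.List.pyGet? xs ((j : Int)) = v then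
      cal_rank_scan xs n v fuel (j + 1)
    else j

-- outer while loop over run starts; extend out with range(1, j - i + 1)
def cal_rank_outer (xs : List Int) (n : Nat) : Nat → Nat → List Int → List Int
  | 0, _, out => out
  | fuel + 1, i, out =>
    if i < n then
      let j := cal_rank_scan xs n (PySem.List.pyGet? xs ((i : Int))) n (i + 1)
      cal_rank_outer xs n fuel j (out ++ PySem.List.pyRange 1 ((j - i + 1 : Nat) : Int) 1)
    else out

def cal_rank_alt (idx_list : List Int) : List Int :=
  cal_rank_outer idx_list idx_list.length idx_list.length 0 []

-- ===== PRECONDITION & SPEC =====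
def Spec_cal_rank (idx_list : List Int) (out : List Int) : Prop := out = cal_rank_alt idx_list
instance (idx_list : List Int) (out : List Int) : Decidable (Spec_cal_rank idx_list out) := by unfold Spec_cal_rank; infer_instance

-- ===== CLAIM (what is proved, stated in full; the proofs are below) =====
def Claim_equal_cal_rank : Prop := ∀ (idx_list : List Int), Dom_cal_rank idx_list → Spec_cal_rank idx_list (cal_rank idx_list)

-- ===== LEMMAS AND PROOFS =====

-- structural characterisation of A's loop
def fA : List Int → Int → List Int
  | [], _ => []
  | [_], idx => [idx + 1]
  | x :: y :: t, idx =>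
    if x = y then (idx + 1) :: fA (y :: t) (idx + 1)
    else (idx + 1) :: fA (y :: t) 0

-- length of the leading run of elements equal to x
def runLen (x : Int) : List Int → Nat
  | [] => 0
  | y :: t => if y = x then runLen x t + 1 else 0

theorem runLen_le_length (x : Int) (t : List Int) : runLen x t ≤ t.length := by
  induction t with
  | nil => simp [runLen]
  | cons y t ih =>
    simp only [runLen, List.length_cons]
    split <;> omega

-- structural characterisation of B: one pyRange block per maximal run
def gB : List Int → List Int
  | [] => []
  | x :: t =>
    PySem.List.pyRange 1 ((runLen x t : Int) + 2) 1 ++ gB (t.drop (runLen x t))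
termination_by l => l.length
decreasing_by
  simp only [List.length_cons, List.length_drop]
  omega

theorem pyRange_two (a : Int) : PySem.List.pyRange (a + 1) (a + 2) 1 = [a + 1] := by
  have h := PySem.List.pyRange_one_singleton (a + 1)
  rw [show a + 1 + 1 = a + 2 by ring] at h
  exact h

theorem cal_rank_loop_eq (xs : List Int) (fuel : Nat) :
    ∀ (i : Nat) (idx : Int) (acc : List Int), xs.length - i ≤ fuel →
      cal_rank_loop xs xs.length fuel i idx acc = acc ++ fA (xs.drop i) idx := by
  induction fuel with
  | zero =>
    intro i idx acc h
    have hnil : xs.drop i = [] := List.drop_eq_nil_of_le (by omega)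
    rw [cal_rank_loop, hnil]
    simp [fA]
  | succ fuel ih =>
    intro i idx acc h
    by_cases h1 : i < xs.length
    · have hd : xs.drop i = xs[i] :: xs.drop (i + 1) := List.drop_eq_getElem_cons h1
      by_cases h2 : i = xs.length - 1
      · have hnil : xs.drop (i + 1) = [] := List.drop_eq_nil_of_le (by omega)
        rw [cal_rank_loop, if_pos h1, if_pos h2, hd, hnil]
        simp [fA]
      · have h1' : i + 1 < xs.length := by omega
        have hd' : xs.drop (i + 1) = xs[i + 1] :: xs.drop (i + 2) := List.drop_eq_getElem_cons h1'
        have hget : PySem.List.pyGet? xs ((i : Int)) = some xs[i] := by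
          rw [PySem.List.pyGet?_natCast]; exact List.getElem?_eq_getElem h1
        have hget' : PySem.List.pyGet? xs (((i + 1 : Nat) : Int)) = some xs[i + 1] := by
          rw [PySem.List.pyGet?_natCast]; exact List.getElem?_eq_getElem h1'
        rw [cal_rank_loop, if_pos h1, if_neg h2, hget, hget']
        by_cases h3 : xs[i] = xs[i + 1]
        · rw [if_pos (by rw [h3]), ih (i + 1) (idx + 1) (acc ++ [idx + 1]) (by omega)]
          rw [hd, hd', fA, if_pos h3, ← hd']
          simp
        · rw [if_neg (by simp [h3]), ih (i + 1) 0 (acc ++ [idx + 1]) (by omega)]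
          rw [hd, hd', fA, if_neg h3, ← hd']
          simp
    · have hnil : xs.drop i = [] := List.drop_eq_nil_of_le (by omega)
      rw [cal_rank_loop, if_neg h1, hnil]
      simp [fA]

theorem cal_rank_scan_eq (xs : List Int) (x : Int) (fuel : Nat) :
    ∀ (j : Nat), xs.length - j ≤ fuel →
      cal_rank_scan xs xs.length (some x) fuel j = j + runLen x (xs.drop j) := by
  induction fuel with
  | zero =>
    intro j h
    have hnil : xs.drop j = [] := List.drop_eq_nil_of_le (by omega)
    rw [cal_rank_scan, hnil, runLen]
    omega
  | succ fuel ih =>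
    intro j h
    by_cases h1 : j < xs.length
    · have hd : xs.drop j = xs[j] :: xs.drop (j + 1) := List.drop_eq_getElem_cons h1
      have hget : PySem.List.pyGet? xs ((j : Int)) = some xs[j] := by
        rw [PySem.List.pyGet?_natCast]; exact List.getElem?_eq_getElem h1
      by_cases h2 : xs[j] = x
      · rw [cal_rank_scan, if_pos ⟨h1, by rw [hget, h2]⟩, ih (j + 1) (by omega)]
        rw [hd, runLen, if_pos h2]
        omega
      · rw [cal_rank_scan, if_neg (by rw [hget]; simp [h2])]
        rw [hd, runLen, if_neg h2]
        omega
    · have hnil : xs.drop j = [] := List.drop_eq_nil_of_le (by omega)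
      rw [cal_rank_scan, if_neg (by omega), hnil, runLen]
      omega

theorem cal_rank_outer_eq (xs : List Int) (fuel : Nat) :
    ∀ (i : Nat) (out : List Int), xs.length - i ≤ fuel →
      cal_rank_outer xs xs.length fuel i out = out ++ gB (xs.drop i) := by
  induction fuel with
  | zero =>
    intro i out h
    have hnil : xs.drop i = [] := List.drop_eq_nil_of_le (by omega)
    rw [cal_rank_outer, hnil, gB]
    simp
  | succ fuel ih =>
    intro i out h
    by_cases h1 : i < xs.length
    · have hd : xs.drop i = xs[i] :: xs.drop (i + 1) := List.drop_eq_getElem_cons h1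
      have hget : PySem.List.pyGet? xs ((i : Int)) = some xs[i] := by
        rw [PySem.List.pyGet?_natCast]; exact List.getElem?_eq_getElem h1
      have hscan : cal_rank_scan xs xs.length (PySem.List.pyGet? xs ((i : Int))) xs.length (i + 1)
          = i + 1 + runLen xs[i] (xs.drop (i + 1)) := by
        rw [hget, cal_rank_scan_eq xs xs[i] xs.length (i + 1) (by omega)]
      rw [cal_rank_outer, if_pos h1]
      simp only [hscan]
      have hrl := runLen_le_length xs[i] (xs.drop (i + 1))
      simp only [List.length_drop] at hrl
      rw [ih (i + 1 + runLen xs[i] (xs.drop (i + 1))) _ (by omega)]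
      have hdrop : xs.drop (i + 1 + runLen xs[i] (xs.drop (i + 1)))
          = (xs.drop (i + 1)).drop (runLen xs[i] (xs.drop (i + 1))) := by
        rw [List.drop_drop]
      rw [hdrop, hd, gB]
      have harith : i + 1 + runLen xs[i] (xs.drop (i + 1)) - i + 1
          = runLen xs[i] (xs.drop (i + 1)) + 2 := by omega
      rw [harith]
      push_cast
      simp
    · have hnil : xs.drop i = [] := List.drop_eq_nil_of_le (by omega)
      rw [cal_rank_outer, if_neg h1, hnil, gB]
      simp

-- one maximal run of fA: values idx+1 … idx+runLen+1, then restart at 0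
theorem fA_run (x : Int) (t : List Int) (idx : Int) :
    fA (x :: t) idx
      = PySem.List.pyRange (idx + 1) (idx + (runLen x t : Int) + 2) 1
        ++ fA (t.drop (runLen x t)) 0 := by
  induction t generalizing idx with
  | nil =>
    rw [fA, runLen]
    simp [pyRange_two, fA]
  | cons y t' ih =>
    by_cases h : y = x
    · subst h
      rw [fA, if_pos rfl, runLen, if_pos rfl, ih (idx + 1)]
      rw [PySem.List.pyRange_one_cons (a := idx + 1)
        (b := idx + ((runLen y t' + 1 : Nat) : Int) + 2) (by push_cast; omega)]
      have hb : idx + 1 + (runLen y t' : Int) + 2 = idx + ((runLen y t' + 1 : Nat) : Int) + 2 := by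
        push_cast; ring
      rw [← hb]
      simp
    · rw [fA, if_neg (fun hxy => h hxy.symm), runLen, if_neg h]
      simp [pyRange_two]

theorem fA_eq_gB (l : List Int) : fA l 0 = gB l := by
  match l with
  | [] => rw [fA, gB]
  | x :: t =>
    rw [fA_run, gB, fA_eq_gB (t.drop (runLen x t))]
    norm_num
termination_by l.length
decreasing_by
  simp only [List.length_cons, List.length_drop]
  omega

-- ===== VERDICT (by name: the statement is the Claim_ definition above) =====
theorem cal_rank_spec : Claim_equal_cal_rank := by
  intro xs _
  show cal_rank xs = cal_rank_alt xs
  rw [cal_rank, cal_rank_alt,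
    cal_rank_loop_eq xs xs.length 0 0 [] (by omega),
    cal_rank_outer_eq xs xs.length 0 [] (by omega)]
  simp [fA_eq_gB]
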